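-- pv_equiv track=rewrite | github.com/yusufaltug/butunleme_hazirlik_kodlari | butunleme_hazirlik_sorulari.py | buyuk_harf_kucult_ve_alt_cizgi_ekle_alg
-- ===== SOURCE A (Python) =====
-- def buyuk_harf_kucult_ve_alt_cizgi_ekle_alg(metin):
--     duzeltilmis_metin = ""
--     for karakter in metin:
--         if 'A' <= karakter <= 'Z':
--             duzeltilmis_metin += chr(ord(karakter) + 32)
--         elif karakter == ' ':
--             duzeltilmis_metin += '_'
--         else:
--             duzeltilmis_metin += karakter
--     return duzeltilmis_metin
-- ===== SOURCE B (Python) =====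
-- def buyuk_harf_kucult_ve_alt_cizgi_ekle_alg(metin):
--     # Split into space-separated chunks, lowercase each chunk, rejoin with '_':
--     # the space->underscore substitution is done by the join, not per character.
--     return '_'.join(parca.lower() for parca in metin.split(' '))
-- ===== Notes on version B (the rewrite author's own statement) =====
-- stated objective: idiomatic
-- what changed: Replaces A's per-character branching loop with string concatenation by a chunk-level pipeline: split the string on spaces, lowercase each chunk, and rejoin with underscores, so the space-to-underscore substitution happens structurally in the join rather than per character.
import Mathlib
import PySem

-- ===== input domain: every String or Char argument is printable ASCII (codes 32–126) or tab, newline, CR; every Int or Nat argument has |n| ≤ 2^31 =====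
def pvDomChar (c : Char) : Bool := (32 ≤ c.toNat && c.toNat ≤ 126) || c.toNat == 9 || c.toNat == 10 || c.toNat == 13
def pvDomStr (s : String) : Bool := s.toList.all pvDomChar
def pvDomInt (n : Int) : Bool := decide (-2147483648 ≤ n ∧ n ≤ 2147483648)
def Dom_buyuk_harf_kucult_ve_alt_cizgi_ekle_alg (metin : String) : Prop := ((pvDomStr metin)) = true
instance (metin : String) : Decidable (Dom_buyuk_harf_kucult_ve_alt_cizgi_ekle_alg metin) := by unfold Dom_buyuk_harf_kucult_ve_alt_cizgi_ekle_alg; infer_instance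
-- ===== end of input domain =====

-- B replaces A's per-character branching accumulator loop by a chunk-level decomposition:
-- split on spaces, lowercase each chunk, rejoin with underscores (idiomatic; return value only).

-- ===== PORT A =====
-- literal port of A: build the result string character by character, branching per character
def buyuk_harf_kucult_ve_alt_cizgi_ekle_alg (metin : String) : String :=
  metin.toList.foldl
    (fun duzeltilmis_metin karakter =>
      if 'A' ≤ karakter ∧ karakter ≤ 'Z' then
        duzeltilmis_metin.push (Char.ofNat (karakter.toNat + 32))
      else if karakter = ' ' then
        duzeltilmis_metin.push '_'
      else
        duzeltilmis_metin.push karakter)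
    ""

-- ===== PORT B =====
-- literal port of Source B: metin.split(' ') with a one-character separator is List.splitOn ' '
-- on the character list; parca.lower() is PySem.Chars.lower (exact on the ASCII domain);
-- '_'.join(...) is PySem.Chars.join ['_'].
def buyuk_harf_kucult_ve_alt_cizgi_ekle_alg_alt (metin : String) : String :=
  String.ofList
    (PySem.Chars.join ['_'] ((metin.toList.splitOn ' ').map PySem.Chars.lower))

-- ===== PRECONDITION & SPEC =====
def Spec_buyuk_harf_kucult_ve_alt_cizgi_ekle_alg (metin : String) (out : String) : Prop := out = buyuk_harf_kucult_ve_alt_cizgi_ekle_alg_alt metin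
instance (metin : String) (out : String) : Decidable (Spec_buyuk_harf_kucult_ve_alt_cizgi_ekle_alg metin out) := by unfold Spec_buyuk_harf_kucult_ve_alt_cizgi_ekle_alg; infer_instance

-- ===== CLAIM =====
def Claim_equal_buyuk_harf_kucult_ve_alt_cizgi_ekle_alg : Prop := ∀ (metin : String), Dom_buyuk_harf_kucult_ve_alt_cizgi_ekle_alg metin → Spec_buyuk_harf_kucult_ve_alt_cizgi_ekle_alg metin (buyuk_harf_kucult_ve_alt_cizgi_ekle_alg metin)

-- ===== LEMMAS AND PROOFS =====

-- A's branch, as a function of the character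
def pvStepA (karakter : Char) : Char :=
  if 'A' ≤ karakter ∧ karakter ≤ 'Z' then Char.ofNat (karakter.toNat + 32)
  else if karakter = ' ' then '_'
  else karakter

-- A's accumulator loop builds exactly the map of pvStepA (stated on the character lists)
theorem pvFoldA (l : List Char) (acc : String) :
    (l.foldl
      (fun duzeltilmis_metin karakter =>
        if 'A' ≤ karakter ∧ karakter ≤ 'Z' then
          duzeltilmis_metin.push (Char.ofNat (karakter.toNat + 32))
        else if karakter = ' ' then
          duzeltilmis_metin.push '_'
        else
          duzeltilmis_metin.push karakter) acc).toList
    = acc.toList ++ l.map pvStepA := by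
  induction l generalizing acc with
  | nil => simp
  | cons c t ih =>
      simp only [List.foldl_cons, List.map_cons, ih]
      by_cases h1 : 'A' ≤ c ∧ c ≤ 'Z'
      · simp [pvStepA, h1]
      · by_cases h2 : c = ' '
        · simp [pvStepA, h2]
        · simp [pvStepA, h1, h2]

-- on characters other than ' ', A's step is exactly ASCII lowercasing
theorem pvStepA_eq_lower (c : Char) (h : c ≠ ' ') :
    pvStepA c = PySem.Chars.lowerChar c := by
  simp only [pvStepA, PySem.Chars.lowerChar, PySem.Chars.isupper]
  by_cases h1 : 'A' ≤ c ∧ c ≤ 'Z'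
  · simp [h1.1, h1.2]
  · rcases not_and_or.mp h1 with h' | h' <;> simp [h', h]

-- intercalate on a list with a non-empty tail peels off head ++ sep
theorem pvIntercalate_cons (sep x : List Char) (S : List (List Char)) (hS : S ≠ []) :
    List.intercalate sep (x :: S) = x ++ sep ++ List.intercalate sep S := by
  cases S with
  | nil => exact absurd rfl hS
  | cons y t => simp [List.intercalate, List.intersperse]

-- prepending a character to the first chunk prepends it to the joined result
theorem pvIntercalate_modifyHead (sep : List Char) (a : Char) (S : List (List Char))
    (hS : S ≠ []) :
    List.intercalate sep (S.modifyHead (List.cons a)) = a :: List.intercalate sep S := by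
  cases S with
  | nil => exact absurd rfl hS
  | cons x t =>
      cases t with
      | nil => simp [List.intercalate]
      | cons y u => simp [List.modifyHead, pvIntercalate_cons]

-- the split / lowercase-chunks / join pipeline equals the per-character map
theorem pvSplitJoin (l : List Char) :
    PySem.Chars.join ['_'] ((l.splitOn ' ').map PySem.Chars.lower) = l.map pvStepA := by
  induction l with
  | nil => simp [List.splitOn, PySem.Chars.join, PySem.Chars.lower, List.intercalate]
  | cons c t ih =>
      by_cases h : c = ' '
      · subst h
        have hne : (t.splitOn ' ').map PySem.Chars.lower ≠ [] := by
          simp [List.splitOn, List.splitOnP_ne_nil]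
        simp only [List.splitOn, List.splitOnP_cons, beq_self_eq_true, if_true, List.map_cons,
          PySem.Chars.join] at *
        rw [pvIntercalate_cons _ _ _ hne]
        simp [PySem.Chars.lower, pvStepA, ih]
      · have hne : (t.splitOn ' ').map PySem.Chars.lower ≠ [] := by
          simp [List.splitOn, List.splitOnP_ne_nil]
        have hmod : ((c :: t).splitOn ' ').map PySem.Chars.lower
            = ((t.splitOn ' ').map PySem.Chars.lower).modifyHead
                (List.cons (PySem.Chars.lowerChar c)) := by
          simp only [List.splitOn, List.splitOnP_cons, beq_iff_eq, h, if_false]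
          cases he : (t.splitOnP (· == ' ')) with
          | nil => exact absurd he (List.splitOnP_ne_nil _ _)
          | cons x u => simp [PySem.Chars.lower]
        simp only [PySem.Chars.join] at *
        rw [hmod, pvIntercalate_modifyHead _ _ _ hne, ih]
        simp [pvStepA_eq_lower c h]

-- ===== VERDICT =====
theorem buyuk_harf_kucult_ve_alt_cizgi_ekle_alg_spec : Claim_equal_buyuk_harf_kucult_ve_alt_cizgi_ekle_alg := by
  intro metin _
  unfold Spec_buyuk_harf_kucult_ve_alt_cizgi_ekle_alg
  unfold buyuk_harf_kucult_ve_alt_cizgi_ekle_alg buyuk_harf_kucult_ve_alt_cizgi_ekle_alg_alt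
  apply String.toList_inj.mp
  rw [pvFoldA, pvSplitJoin]
  simp
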